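-- pv_equiv track=rewrite | github.com/sriramr244/tiktokce | build/lib/social_content_engine/main.py | generate_subtitle_segments
-- ===== SOURCE A (Python) =====
-- def generate_subtitle_segments(text: str):
--     """
--     Generate subtitle segments based on the provided text.
--     This is a simple segmentation approach; in practice, you may want to use NLP techniques.
--     """
--     lines = text.split("\n")
--     subtitle_segments = []
--     start_time = 0
--     for line in lines:
--         duration = (
--             len(line.split()) // 2
--         )  # Approximate duration based on word count
--         subtitle_segments.append((start_time, start_time + duration, line))
--         start_time += duration
--     return subtitle_segments
-- ===== SOURCE B (Python) =====
-- def generate_subtitle_segments(text: str):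
--     lines = text.split("\n")
--     durations = [len(line.split()) // 2 for line in lines]
--     starts = [0]
--     for d in durations:
--         starts.append(starts[-1] + d)
--     return [(s, s + d, line) for line, s, d in zip(lines, starts, durations)]
-- ===== Notes on version B (the rewrite author's own statement) =====
-- stated objective: alternative
-- what changed: Replaces the single accumulator-threading loop with a three-stage pipeline: per-line durations, a prefix-sum list of start offsets, and a zip/comprehension assembling the segments.
import Mathlib
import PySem

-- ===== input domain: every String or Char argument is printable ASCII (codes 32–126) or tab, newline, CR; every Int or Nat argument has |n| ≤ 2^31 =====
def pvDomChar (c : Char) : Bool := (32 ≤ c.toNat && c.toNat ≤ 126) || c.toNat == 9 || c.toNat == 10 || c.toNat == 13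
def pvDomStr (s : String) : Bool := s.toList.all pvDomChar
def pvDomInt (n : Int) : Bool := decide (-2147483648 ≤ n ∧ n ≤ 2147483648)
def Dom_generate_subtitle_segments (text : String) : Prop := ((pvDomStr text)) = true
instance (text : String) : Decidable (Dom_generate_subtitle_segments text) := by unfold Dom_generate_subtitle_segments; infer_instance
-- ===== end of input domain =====

-- B replaces A's single accumulator-threading loop with a durations / prefix-sum / zip pipeline (alternative decomposition, same cost).

-- ===== PORT A =====
def generate_subtitle_segments (text : String) : List (Int × Int × String) :=
  let lines := (PySem.Str.split? text "\n").getD []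
  (lines.foldl
    (fun (st : List (Int × Int × String) × Int) line =>
      let duration : Int := PySem.Int.floordiv ((PySem.Str.split₀ line).length : Int) 2
      (st.1 ++ [(st.2, st.2 + duration, line)], st.2 + duration))
    ([], 0)).1

-- ===== PORT B =====
def generate_subtitle_segments_alt (text : String) : List (Int × Int × String) :=
  let lines := (PySem.Str.split? text "\n").getD []
  let durations : List Int := lines.map (fun line => PySem.Int.floordiv ((PySem.Str.split₀ line).length : Int) 2)
  let starts : List Int := durations.scanl (· + ·) 0
  (lines.zip (starts.zip durations)).map (fun p => (p.2.1, p.2.1 + p.2.2, p.1))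

-- ===== PRECONDITION & SPEC =====
def Spec_generate_subtitle_segments (text : String) (out : List (Int × Int × String)) : Prop := out = generate_subtitle_segments_alt text
instance (text : String) (out : List (Int × Int × String)) : Decidable (Spec_generate_subtitle_segments text out) := by unfold Spec_generate_subtitle_segments; infer_instance

-- ===== CLAIM (what is proved, stated in full; the proofs are below) =====
def Claim_equal_generate_subtitle_segments : Prop := ∀ (text : String), Dom_generate_subtitle_segments text → Spec_generate_subtitle_segments text (generate_subtitle_segments text)

-- ===== LEMMAS AND PROOFS =====

-- A's fold with starting offset s and already-built segments acc equals acc ++ B's pipeline started at s.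
theorem pv_fold_eq_pipeline (d : String → Int) (lines : List String)
    (acc : List (Int × Int × String)) (s : Int) :
    (lines.foldl
      (fun (st : List (Int × Int × String) × Int) line =>
        (st.1 ++ [(st.2, st.2 + d line, line)], st.2 + d line))
      (acc, s)).1
    = acc ++ (lines.zip (((lines.map d).scanl (· + ·) s).zip (lines.map d))).map
        (fun p => (p.2.1, p.2.1 + p.2.2, p.1)) := by
  induction lines generalizing acc s with
  | nil => simp
  | cons l ls ih =>
      simp only [List.foldl_cons, List.map_cons, List.scanl_cons, List.zip_cons_cons,
        List.map_cons]
      rw [ih]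
      simp [List.append_assoc]

-- ===== VERDICT (by name: the statement is the Claim_ definition above) =====
theorem generate_subtitle_segments_spec : Claim_equal_generate_subtitle_segments := by
  intro text _
  unfold Spec_generate_subtitle_segments generate_subtitle_segments generate_subtitle_segments_alt
  exact pv_fold_eq_pipeline _ _ [] 0
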